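-- pv_equiv track=rewrite | github.com/griffin-analytics/griffin | external-deps/qtconsole/qtconsole/console_widget.py | _get_last_lines
-- ===== SOURCE A (Python) =====
-- def _get_last_lines(text, num_lines, return_count=False):
--     """ Get the last specified number of lines of text (like `tail -n`).
--     If return_count is True, returns a tuple of clipped text and the
--     number of lines in the clipped text.
--     """
--     pos = len(text)
--     if pos < num_lines:
--         if return_count:
--             return text, text.count('\n') if return_count else text
--         else:
--             return text
--     i = 0
--     while i < num_lines:
--         pos = text.rfind('\n', None, pos)
--         if pos == -1:
--             pos = None
--             break
--         i += 1
--     if return_count: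
--         return text[pos:], i
--     else:
--         return text[pos:]
-- ===== SOURCE B (Python) =====
-- def _get_last_lines(text, num_lines, return_count=False):
--     """Tail of `text`: forward split on '\n' and rejoin the last segments,
--     instead of scanning backward with rfind. Matches A exactly, including
--     the (clipped, count) tuple when return_count is True."""
--     if num_lines <= 0:
--         clipped, count = '', 0
--     else:
--         parts = text.split('\n')
--         if len(parts) <= num_lines:
--             clipped, count = text, len(parts) - 1
--         else:
--             clipped = '\n' + '\n'.join(parts[len(parts) - num_lines:])
--             count = num_lines
--     return (clipped, count) if return_count else clipped
-- ===== Notes on version B (the rewrite author's own statement) =====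
-- stated objective: idiomatic
-- what changed: Replaces A's backward rfind pointer loop (repeated text.rfind('\n', None, pos)) with a single forward split('\n') and a rejoin of the last num_lines segments; B reproduces A exactly in BOTH modes, including the (clipped, count) tuple when return_count=True.
-- outside the precondition, e.g. on _get_last_lines('a\nb', 1, True): A returns ('\nb', 1), B returns ('\nb', 1); on _get_last_lines('x\ny\nz', 5, True): A returns ('x\ny\nz', 2), B returns ('x\ny\nz', 2)
import Mathlib
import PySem

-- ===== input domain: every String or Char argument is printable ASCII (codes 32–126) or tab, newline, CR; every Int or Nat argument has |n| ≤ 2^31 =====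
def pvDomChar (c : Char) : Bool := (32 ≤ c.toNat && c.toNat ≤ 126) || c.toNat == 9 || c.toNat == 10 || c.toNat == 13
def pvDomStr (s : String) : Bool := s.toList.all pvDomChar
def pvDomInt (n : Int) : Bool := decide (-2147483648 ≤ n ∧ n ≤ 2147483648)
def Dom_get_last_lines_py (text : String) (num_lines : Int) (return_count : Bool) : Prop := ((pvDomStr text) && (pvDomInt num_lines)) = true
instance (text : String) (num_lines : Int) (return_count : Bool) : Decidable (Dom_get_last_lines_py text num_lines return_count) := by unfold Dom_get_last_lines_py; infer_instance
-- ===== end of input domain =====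

-- B replaces A's backward rfind pointer scan by a forward split on '\n' and a rejoin of the
-- last num_lines segments (idiomatic). The Python B reproduces A exactly in BOTH modes,
-- including the (clipped, count) tuple when return_count=True; that tuple mode lies outside
-- the declared Lean return type String, so the Lean claim covers return_count = False.

-- ===== PORT A =====
-- A's while loop: pos = text.rfind('\n', None, pos), up to num_lines times; 'none' is Python's pos = None
def getLastLinesLoop (s : List Char) : Int → Nat → Option Int
  | pos, 0 => some pos
  | pos, n+1 =>
    let r := PySem.Chars.rfindFrom s ['\n'] 0 (some pos)  -- text.rfind('\n', None, pos)
    if r = -1 then none else getLastLinesLoop s r n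

def get_last_lines_py (text : String) (num_lines : Int) (return_count : Bool) : String :=
  -- Pre_ restricts to return_count = False; there Python returns the clipped str (True returns a tuple)
  let pos : Int := PySem.Chars.len text.toList   -- pos = len(text)
  if pos < num_lines then text
  else
    match getLastLinesLoop text.toList pos num_lines.toNat with  -- 'while i < num_lines' runs max(num_lines, 0) times
    | none => text                                               -- pos = None: text[None:] is all of text
    | some p => String.ofList (PySem.Chars.slice text.toList (some p) none)  -- text[pos:]

-- ===== PORT B =====
def get_last_lines_py_alt (text : String) (num_lines : Int) (return_count : Bool) : String :=
  if num_lines ≤ 0 then ""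
  else
    let parts := (PySem.Chars.split? text.toList ['\n']).getD []  -- text.split('\n'); sep ≠ '' so never none
    if (parts.length : Int) ≤ num_lines then text
    else  -- '\n' + '\n'.join(parts[len(parts) - num_lines:])
      String.ofList ('\n' :: PySem.Chars.join ['\n']
        (PySem.List.slice parts (some ((parts.length : Int) - num_lines)) none))

-- ===== PRECONDITION & SPEC =====
-- Pre_ excludes only return_count = True, where A's return value is a (str, int) TUPLE — not a value
-- of the declared Lean return type String, so it cannot even be stated here. This is purely a type
-- restriction, not a behavioural carve-out: the Python B reproduces A's tuple exactly on those inputs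
-- (same clipped text AND same count, see the cites), so nothing of A's behaviour is being dodged.
def Pre_get_last_lines_py (text : String) (num_lines : Int) (return_count : Bool) : Prop :=
  return_count = false
instance (text : String) (num_lines : Int) (return_count : Bool) : Decidable (Pre_get_last_lines_py text num_lines return_count) := by unfold Pre_get_last_lines_py; infer_instance

def pvWitness_get_last_lines_py : String × Int × Bool := ("a\nbb\nc", 2, false)

def Spec_get_last_lines_py (text : String) (num_lines : Int) (return_count : Bool) (out : String) : Prop := out = get_last_lines_py_alt text num_lines return_count
instance (text : String) (num_lines : Int) (return_count : Bool) (out : String) : Decidable (Spec_get_last_lines_py text num_lines return_count out) := by unfold Spec_get_last_lines_py; infer_instance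

-- ===== CLAIM (what is proved, stated in full; the proofs are below) =====
def Claim_equal_get_last_lines_py : Prop := ∀ (text : String) (num_lines : Int) (return_count : Bool), Dom_get_last_lines_py text num_lines return_count → Pre_get_last_lines_py text num_lines return_count → Spec_get_last_lines_py text num_lines return_count (get_last_lines_py text num_lines return_count)

-- ===== LEMMAS AND PROOFS =====

-- Reference splitter: the segments of w between '\n' characters (= w.split('\n')).
def segs : List Char → List (List Char)
  | [] => [[]]
  | c :: rest =>
    if c = '\n' then [] :: segs rest
    else match segs rest with
      | [] => [[c]]
      | s :: ss => (c :: s) :: ss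

lemma segs_ne_nil (w : List Char) : segs w ≠ [] := by
  induction w with
  | nil => simp [segs]
  | cons c rest ih =>
    simp only [segs]
    split
    · simp
    · split
      · simp
      · simp

lemma segs_length_le (w : List Char) : (segs w).length ≤ w.length + 1 := by
  induction w with
  | nil => simp [segs]
  | cons c rest ih =>
    simp only [segs]
    split
    · simpa using Nat.succ_le_succ ih
    · split
      · simp
      · rename_i s ss h
        rw [h] at ih
        simp only [List.length_cons] at ih ⊢
        omega

lemma segs_no_nl {v : List Char} (h : '\n' ∉ v) : segs v = [v] := by
  induction v with
  | nil => simp [segs]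
  | cons c rest ih =>
    have hc : c ≠ '\n' := by intro hc; exact h (by simp [hc])
    have hr : '\n' ∉ rest := fun hm => h (by simp [hm])
    simp [segs, hc, ih hr]

lemma segs_append {u v : List Char} (h : '\n' ∉ v) :
    segs (u ++ '\n' :: v) = segs u ++ [v] := by
  induction u with
  | nil => simp [segs, segs_no_nl h]
  | cons c rest ih =>
    by_cases hc : c = '\n'
    · simp [segs, hc, ih]
    · simp only [List.cons_append, segs, hc, ih]
      rcases hs : segs rest with _ | ⟨s, ss⟩
      · exact absurd hs (segs_ne_nil rest)
      · simp [hs]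

-- PySem.Chars.splitOn on the one-character separator ['\n'] computes segs.
lemma splitOn_go_spec :
    ∀ (fuel : Nat) (l cur : List Char) (acc : List (List Char)), l.length < fuel →
      PySem.Chars.splitOn.go ['\n'] fuel l cur acc =
        acc.reverse ++
          (match segs l with
            | [] => [cur.reverse]
            | s :: ss => (cur.reverse ++ s) :: ss) := by
  intro fuel
  induction fuel with
  | zero => intro l cur acc h; omega
  | succ f ih =>
    intro l cur acc h
    cases l with
    | nil =>
      simp [PySem.Chars.splitOn.go, segs]
    | cons c rest =>
      simp only [List.length_cons, Nat.succ_lt_succ_iff] at h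
      by_cases hc : c = '\n'
      · have hpre : List.isPrefixOf ['\n'] (c :: rest) = true := by
          simp [List.isPrefixOf, hc]
        simp only [PySem.Chars.splitOn.go, hpre, if_true, List.length_cons,
          List.length_nil, List.drop_succ_cons, List.drop_zero]
        rw [ih rest [] _ h]
        rcases hs : segs rest with _ | ⟨s, ss⟩
        · exact absurd hs (segs_ne_nil rest)
        · simp [segs, hc, hs]
      · have hpre : List.isPrefixOf ['\n'] (c :: rest) = false := by
          simp [List.isPrefixOf]
          exact fun hh => absurd hh.symm hc
        simp only [PySem.Chars.splitOn.go, hpre, Bool.false_eq_true, if_false]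
        rw [ih rest (c :: cur) _ h]
        rcases hs : segs rest with _ | ⟨s, ss⟩
        · exact absurd hs (segs_ne_nil rest)
        · simp [segs, hc, hs]

lemma splitOn_eq_segs (w : List Char) : PySem.Chars.splitOn w ['\n'] = segs w := by
  show PySem.Chars.splitOn.go ['\n'] (w.length + 1) w [] [] = segs w
  rw [splitOn_go_spec _ _ _ _ (by omega)]
  rcases hs : segs w with _ | ⟨s, ss⟩
  · exact absurd hs (segs_ne_nil w)
  · simp

lemma split?_eq_segs (w : List Char) :
    (PySem.Chars.split? w ['\n']).getD [] = segs w := by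
  simp [PySem.Chars.split?, splitOn_eq_segs]

-- one-step unfoldings of A's loop
lemma loop_zero (s : List Char) (pos : Int) : getLastLinesLoop s pos 0 = some pos := rfl

lemma loop_succ (s : List Char) (pos : Int) (n : Nat) :
    getLastLinesLoop s pos (n+1) =
      if PySem.Chars.rfindFrom s ['\n'] 0 (some pos) = -1 then none
      else getLastLinesLoop s (PySem.Chars.rfindFrom s ['\n'] 0 (some pos)) n := rfl

-- rfind of '\n': -1 when absent, the index of the last '\n' otherwise.
lemma rfind_go_none {w : List Char} (h : '\n' ∉ w) : ∀ (j : Nat),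
    PySem.Chars.rfind.go w ['\n'] j = -1 := by
  intro j
  induction j with
  | zero =>
    have hnp : ¬ (List.isPrefixOf ['\n'] w = true) := by
      intro hp
      exact h ((List.isPrefixOf_iff_prefix.mp hp).subset (by simp))
    simp [PySem.Chars.rfind.go, hnp]
  | succ j ih =>
    have hnp : ¬ (List.isPrefixOf ['\n'] (List.drop (j+1) w) = true) := by
      intro hp
      exact h (List.drop_subset _ _ ((List.isPrefixOf_iff_prefix.mp hp).subset (by simp)))
    simp only [PySem.Chars.rfind.go, hnp]
    simpa using ih

lemma rfind_no_nl {w : List Char} (h : '\n' ∉ w) : PySem.Chars.rfind w ['\n'] = -1 :=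
  rfind_go_none h w.length

lemma rfind_go_hit {s : List Char} {j : Nat}
    (h : List.isPrefixOf ['\n'] (List.drop j s) = true) :
    PySem.Chars.rfind.go s ['\n'] j = (j : Int) := by
  cases j with
  | zero => simp only [List.drop_zero] at h; simp [PySem.Chars.rfind.go, h]
  | succ j => simp [PySem.Chars.rfind.go, h]

lemma rfind_go_last {u v : List Char} (h : '\n' ∉ v) : ∀ (k : Nat), k ≤ v.length + 1 →
    PySem.Chars.rfind.go (u ++ '\n' :: v) ['\n'] (u.length + k) = (u.length : Int) := by
  intro k
  induction k with
  | zero =>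
    intro _
    apply rfind_go_hit
    rw [Nat.add_zero, List.drop_left]
    simp [List.isPrefixOf]
  | succ k ih =>
    intro hk
    have hdrop : List.drop (u.length + (k+1)) (u ++ '\n' :: v) = List.drop k v := by
      rw [List.drop_append]
      simp [List.drop_eq_nil_of_le]
    have hnp : ¬ (List.isPrefixOf ['\n'] (List.drop (u.length + (k+1)) (u ++ '\n' :: v)) = true) := by
      rw [hdrop]
      intro hp
      exact h (List.drop_subset _ _ ((List.isPrefixOf_iff_prefix.mp hp).subset (by simp)))
    rw [show u.length + (k+1) = (u.length + k) + 1 by omega]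
    simp only [PySem.Chars.rfind.go]
    rw [if_neg (by rw [show (u.length + k) + 1 = u.length + (k+1) by omega]; exact hnp)]
    exact ih (by omega)

lemma rfind_last {u v : List Char} (h : '\n' ∉ v) :
    PySem.Chars.rfind (u ++ '\n' :: v) ['\n'] = (u.length : Int) := by
  show PySem.Chars.rfind.go (u ++ '\n' :: v) ['\n'] (u ++ '\n' :: v).length = (u.length : Int)
  rw [show (u ++ '\n' :: v).length = u.length + (v.length + 1) by simp]
  exact rfind_go_last h (v.length + 1) le_rfl

-- rfind('\n', None, pos) with 0 ≤ pos ≤ len is rfind on the prefix of length pos.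
lemma rfindFrom_take (cs : List Char) (p : Nat) (hp : p ≤ cs.length) :
    PySem.Chars.rfindFrom cs ['\n'] 0 (some (p : Int)) =
      PySem.Chars.rfind (cs.take p) ['\n'] := by
  have h1 : ¬ ((cs.length : Int) < (p : Int)) := by exact_mod_cast Nat.not_lt.mpr hp
  have h2 : ¬ ((p : Int) < 0) := by omega
  simp only [PySem.Chars.rfindFrom, h1, if_false, h2,
    if_neg (by omega : ¬ ((0:Int) < 0)), Int.toNat_natCast, Int.toNat_zero, List.drop_zero]
  by_cases hr : PySem.Chars.rfind (List.take p cs) ['\n'] = -1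
  · simp [hr]
  · simp [hr]

-- last-newline decomposition
lemma exists_last_nl {w : List Char} (h : '\n' ∈ w) :
    ∃ u v, w = u ++ '\n' :: v ∧ '\n' ∉ v := by
  induction w with
  | nil => cases h
  | cons c rest ih =>
    by_cases hr : '\n' ∈ rest
    · obtain ⟨u, v, rfl, hv⟩ := ih hr
      exact ⟨c :: u, v, rfl, hv⟩
    · have hc : c = '\n' := by
        rcases List.mem_cons.mp h with h' | h'
        · exact h'.symm
        · exact absurd h' hr
      exact ⟨[], rest, by simp [hc], hr⟩

-- the loop only reads the prefix of the text below pos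
lemma loop_localize : ∀ (n : Nat) (cs w : List Char), w <+: cs →
    getLastLinesLoop cs (w.length : Int) n = getLastLinesLoop w (w.length : Int) n := by
  intro n
  induction n with
  | zero => intro cs w _; rfl
  | succ n ih =>
    intro cs w hpre
    have htake : List.take w.length cs = w := (List.prefix_iff_eq_take.mp hpre).symm
    simp only [loop_succ]
    rw [rfindFrom_take cs w.length hpre.length_le, htake,
        rfindFrom_take w w.length le_rfl, List.take_length]
    by_cases hw : '\n' ∈ w
    · obtain ⟨u, v, rfl, hv⟩ := exists_last_nl hw
      rw [rfind_last hv]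
      have hne : (u.length : Int) ≠ -1 := by omega
      rw [if_neg hne, if_neg hne]
      have hu_w : u <+: u ++ '\n' :: v := List.prefix_append u _
      rw [ih cs u (hu_w.trans hpre), ih (u ++ '\n' :: v) u hu_w]
    · rw [rfind_no_nl hw]
      simp

lemma loop_some_le : ∀ (n : Nat) (w : List Char) (p : Int),
    getLastLinesLoop w (w.length : Int) n = some p → 0 ≤ p ∧ p.toNat ≤ w.length := by
  intro n
  induction n with
  | zero =>
    intro w p hp
    rw [loop_zero, Option.some_inj] at hp
    subst hp
    simp
  | succ n ih =>
    intro w p hp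
    rw [loop_succ, rfindFrom_take w w.length le_rfl, List.take_length] at hp
    by_cases hw : '\n' ∈ w
    · obtain ⟨u, v, rfl, hv⟩ := exists_last_nl hw
      rw [rfind_last hv, if_neg (by omega : (u.length : Int) ≠ -1),
          loop_localize n (u ++ '\n' :: v) u (List.prefix_append u _)] at hp
      obtain ⟨h1, h2⟩ := ih u p hp
      exact ⟨h1, by simp only [List.length_append, List.length_cons]; omega⟩
    · rw [rfind_no_nl hw] at hp
      simp at hp

-- two small facts about intercalate with the ['\n'] separator
lemma intercalate_nl_singleton (v : List Char) : List.intercalate ['\n'] [v] = v := by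
  simp [List.intercalate]

lemma intercalate_nl_append_singleton :
    ∀ (xs : List (List Char)) (x v : List Char),
      List.intercalate ['\n'] ((x :: xs) ++ [v]) =
        List.intercalate ['\n'] (x :: xs) ++ '\n' :: v := by
  intro xs
  induction xs with
  | nil => intro x v; simp [List.intercalate, List.intersperse]
  | cons y ys ih =>
    intro x v
    have h1 : List.intercalate ['\n'] (x :: y :: (ys ++ [v])) =
        x ++ '\n' :: List.intercalate ['\n'] (y :: (ys ++ [v])) := by
      simp [List.intercalate, List.intersperse]
    have h2 : List.intercalate ['\n'] (x :: y :: ys) =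
        x ++ '\n' :: List.intercalate ['\n'] (y :: ys) := by
      simp [List.intercalate, List.intersperse]
    calc List.intercalate ['\n'] ((x :: y :: ys) ++ [v])
        = x ++ '\n' :: List.intercalate ['\n'] ((y :: ys) ++ [v]) := by simpa using h1
      _ = x ++ '\n' :: (List.intercalate ['\n'] (y :: ys) ++ '\n' :: v) := by rw [ih y v]
      _ = List.intercalate ['\n'] (x :: y :: ys) ++ '\n' :: v := by rw [h2]; simp

lemma segs_length_pos (u : List Char) : 1 ≤ (segs u).length := by
  rcases hseg : segs u with _ | ⟨a, t⟩
  · exact absurd hseg (segs_ne_nil u)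
  · simp

-- MAIN: A's loop-and-slice equals B's split-and-rejoin, on lists, for num_lines = n+1 ≥ 1.
lemma main_lemma : ∀ (n : Nat) (w : List Char),
    (match getLastLinesLoop w (w.length : Int) (n+1) with
      | none => w
      | some p => w.drop p.toNat)
    = (if (segs w).length ≤ n+1 then w
        else '\n' :: List.intercalate ['\n'] ((segs w).drop ((segs w).length - (n+1)))) := by
  intro n
  induction n with
  | zero =>
    intro w
    by_cases hw : '\n' ∈ w
    · obtain ⟨u, v, rfl, hv⟩ := exists_last_nl hw
      have hstep : getLastLinesLoop (u ++ '\n' :: v) ((u ++ '\n' :: v).length : Int) 1 =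
          some (u.length : Int) := by
        rw [loop_succ, rfindFrom_take _ _ le_rfl, List.take_length, rfind_last hv,
            if_neg (by omega : (u.length : Int) ≠ -1), loop_zero]
      rw [hstep]
      have hsegs : segs (u ++ '\n' :: v) = segs u ++ [v] := segs_append hv
      have hLu : 1 ≤ (segs u).length := segs_length_pos u
      rw [hsegs,
         if_neg (by simp only [List.length_append, List.length_cons, List.length_nil]; omega)]
      have hidx : (segs u ++ [v]).length - (0+1) = (segs u).length := by
        simp only [List.length_append, List.length_cons, List.length_nil]
        omega
      rw [hidx]
      show List.drop ((u.length : Int)).toNat (u ++ '\n' :: v) = _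
      rw [Int.toNat_natCast, List.drop_left, List.drop_left, intercalate_nl_singleton]
    · have hstep : getLastLinesLoop w (w.length : Int) 1 = none := by
        rw [loop_succ, rfindFrom_take _ _ le_rfl, List.take_length, rfind_no_nl hw]
        simp
      rw [hstep, segs_no_nl hw]
      simp
  | succ n ih =>
    intro w
    by_cases hw : '\n' ∈ w
    · obtain ⟨u, v, rfl, hv⟩ := exists_last_nl hw
      have hstep : getLastLinesLoop (u ++ '\n' :: v) ((u ++ '\n' :: v).length : Int) (n+1+1) =
          getLastLinesLoop u (u.length : Int) (n+1) := by
        rw [loop_succ, rfindFrom_take _ _ le_rfl, List.take_length, rfind_last hv,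
            if_neg (by omega : (u.length : Int) ≠ -1),
            loop_localize (n+1) (u ++ '\n' :: v) u (List.prefix_append u _)]
      rw [hstep]
      have hsegs : segs (u ++ '\n' :: v) = segs u ++ [v] := segs_append hv
      have hLu : 1 ≤ (segs u).length := segs_length_pos u
      have hlhs : (match getLastLinesLoop u (u.length : Int) (n+1) with
            | none => u ++ '\n' :: v
            | some p => (u ++ '\n' :: v).drop p.toNat)
          = (match getLastLinesLoop u (u.length : Int) (n+1) with
            | none => u
            | some p => u.drop p.toNat) ++ '\n' :: v := by
        rcases hres : getLastLinesLoop u (u.length : Int) (n+1) with _ | p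
        · rfl
        · obtain ⟨_, hle⟩ := loop_some_le (n+1) u p hres
          simp only
          rw [List.drop_append_of_le_length hle]
      rw [hlhs, ih u, hsegs]
      by_cases hcond : (segs u).length ≤ n + 1
      · rw [if_pos hcond,
           if_pos (by simp only [List.length_append, List.length_cons, List.length_nil]; omega)]
      · rw [if_neg hcond,
           if_neg (by simp only [List.length_append, List.length_cons, List.length_nil]; omega)]
        have hidx : (segs u ++ [v]).length - (n+1+1) = (segs u).length - (n+1) := by
          simp only [List.length_append, List.length_cons, List.length_nil]
          omega
        rw [hidx, List.drop_append_of_le_length (by omega : (segs u).length - (n+1) ≤ (segs u).length)]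
        have hlen : 1 ≤ (List.drop ((segs u).length - (n+1)) (segs u)).length := by
          rw [List.length_drop]; omega
        rcases hxs : List.drop ((segs u).length - (n+1)) (segs u) with _ | ⟨x, xs⟩
        · rw [hxs] at hlen; simp at hlen
        · rw [intercalate_nl_append_singleton xs x v]
          simp
    · have hstep : getLastLinesLoop w (w.length : Int) (n+1+1) = none := by
        rw [loop_succ, rfindFrom_take _ _ le_rfl, List.take_length, rfind_no_nl hw]
        simp
      rw [hstep, segs_no_nl hw]
      simp

-- glue: B through toList
lemma alt_toList (text : String) (num_lines : Int) (rc : Bool) (n : Nat)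
    (hn : num_lines = ((n : Int) + 1)) :
    (get_last_lines_py_alt text num_lines rc).toList =
      (if (segs text.toList).length ≤ n+1 then text.toList
        else '\n' :: List.intercalate ['\n']
          ((segs text.toList).drop ((segs text.toList).length - (n+1)))) := by
  have hpos : ¬ (num_lines ≤ 0) := by omega
  simp only [get_last_lines_py_alt, hpos, if_false, split?_eq_segs]
  by_cases hcond : (segs text.toList).length ≤ n+1
  · have hci : (((segs text.toList).length : Nat) : Int) ≤ num_lines := by
      rw [hn]; exact_mod_cast hcond
    rw [if_pos hci, if_pos hcond]
  · have hci : ¬ ((((segs text.toList).length : Nat) : Int) ≤ num_lines) := by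
      rw [hn]; intro hx; exact hcond (by exact_mod_cast hx)
    rw [if_neg hci, if_neg hcond, String.toList_ofList]
    have h0 : (0:Int) ≤ ((segs text.toList).length : Int) - num_lines := by omega
    rw [show PySem.Chars.join ['\n'] = List.intercalate ['\n'] from rfl,
        PySem.List.slice_from _ h0]
    have hidx : (((segs text.toList).length : Int) - num_lines).toNat =
        (segs text.toList).length - (n+1) := by omega
    rw [hidx]

theorem get_last_lines_py_spec_aux (text : String) (num_lines : Int) (rc : Bool) :
    get_last_lines_py text num_lines rc = get_last_lines_py_alt text num_lines rc := by
  rw [← String.toList_inj]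
  by_cases h0 : num_lines ≤ 0
  · -- the loop runs 0 times: pos = len(text), text[len:] = '' = B's answer
    have hnlt : ¬ ((text.toList.length : Int) < num_lines) := by omega
    have htn : num_lines.toNat = 0 := Int.toNat_of_nonpos h0
    simp only [get_last_lines_py, PySem.Chars.len_eq, hnlt, if_false, htn, loop_zero,
      get_last_lines_py_alt, h0, if_true]
    rw [String.toList_ofList, PySem.Chars.slice_eq_listSlice,
        PySem.List.slice_from _ (by omega : (0:Int) ≤ ((text.toList.length : Nat) : Int)),
        Int.toNat_natCast, List.drop_length]
    rfl
  · obtain ⟨n, hn⟩ : ∃ n : Nat, num_lines = ((n : Int) + 1) :=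
      ⟨num_lines.toNat - 1, by omega⟩
    rw [alt_toList text num_lines rc n hn]
    by_cases hlt : ((text.toList.length : Int) < num_lines)
    · -- len(text) < num_lines: A returns text; B too, since #segments ≤ len+1 ≤ num_lines
      simp only [get_last_lines_py, PySem.Chars.len_eq, hlt, if_true]
      rw [if_pos]
      have h1 : (segs text.toList).length ≤ text.toList.length + 1 := segs_length_le text.toList
      omega
    · simp only [get_last_lines_py, PySem.Chars.len_eq, hlt, if_false,
        show num_lines.toNat = n + 1 by omega]
      rw [← main_lemma n text.toList]
      rcases hres : getLastLinesLoop text.toList ((text.toList.length : Nat) : Int) (n+1)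
        with _ | p
      · rfl
      · obtain ⟨hp0, _⟩ := loop_some_le (n+1) text.toList p hres
        show (String.ofList (PySem.Chars.slice text.toList (some p) none)).toList =
          List.drop p.toNat text.toList
        rw [String.toList_ofList, PySem.Chars.slice_eq_listSlice,
            PySem.List.slice_from _ hp0]

-- ===== VERDICT (by name: the statement is the Claim_ definition above) =====
theorem get_last_lines_py_spec : Claim_equal_get_last_lines_py := by
  intro text num_lines return_count _ _
  exact get_last_lines_py_spec_aux text num_lines return_count
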